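-- pv_equiv track=rewrite | github.com/iSPD/marketSILVER | SilBrain/compare/compare_db.py | compare_keywords_within_crawled_products_v2
-- ===== SOURCE A (Python) =====
-- def compare_keywords_within_crawled_products_v2(in_list_products, in_keyword_list, in_q_word_list):
--     final_list = []
--
--     comp_whole = compareWhole(in_keyword_list, in_list_products)
--
--     if len(comp_whole) > 0:
--         q_word_and = compareAnd(in_q_word_list, comp_whole)
--         q_word_or = compareOR(in_q_word_list, comp_whole)
--         for andresult in q_word_and:
--             if andresult not in final_list:
--                 final_list.append(andresult)
--         for orresult in q_word_or:
--             if orresult not in final_list: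
--                 final_list.append(orresult)
--         for idx, result in enumerate(comp_whole):
--             if result not in final_list:
--                 final_list.append(result)
--
--         return final_list
--     else:
--         return []
--
-- def compareAnd(input_keyword_list, compare_to):
--     real_cnt = 0
--     output_list = []
--     for dst_sentence in compare_to:
--         real_cnt = 0
--         for keyword in input_keyword_list:
--             if keyword in dst_sentence and keyword != 'none':
--                 real_cnt = real_cnt + 1
--         if real_cnt == len(input_keyword_list):
--             output_list.append(dst_sentence)
--     return output_list
--
-- def compareOR(input_keyword_list, compare_to):
--     output_list = []
--     for dst_sentence in compare_to:
--         for keyword in input_keyword_list: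
--             if keyword == 'none':
--                 output_list.append(dst_sentence)
--                 break
--             else:
--                 splitKeyword = keyword.split(' ')
--                 splitKeywordLength = len(splitKeyword)
--                 sameCount = 0
--                 for sKey in splitKeyword:
--                     if sKey in dst_sentence:
--                         sameCount += 1
--
--                 detectGood = False
--                 if sameCount == splitKeywordLength:
--                     detectGood = True
--
--                 if detectGood == True:
--                     output_list.append(dst_sentence)
--                     break
--                 if len(keyword.split(' ')) == 2:
--                     keyword = keyword.replace(' ', '')
--                     if keyword in dst_sentence:
--                         output_list.append(dst_sentence)
--                         break
--     return output_list
--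
-- def compareWhole(in_main_words_list, in_list_products):
--     match_list = []
--     if len(in_main_words_list) < 2:
--         words = in_main_words_list[0]
--     else:
--         words = ' '.join(in_main_words_list)
--     words = words.strip()
--
--     words_nospace = ' ' + words.replace(' ', '') + ' '
--     words_withspace = ' ' + words.strip() + ' '
--     for idx, product in enumerate(in_list_products):
--         product_only_text = ' ' + product.replace(',', ' ') + ' '
--
--         if words_nospace in product_only_text:
--             match_list.append(product)
--         elif words_withspace in product_only_text:
--             match_list.append(product)
--
--     return match_list
-- ===== SOURCE B (Python) =====
-- def compare_keywords_within_crawled_products_v2(in_list_products, in_keyword_list, in_q_word_list):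
--     # whole-phrase filter (same semantics as the original compareWhole)
--     words = in_keyword_list[0] if len(in_keyword_list) < 2 else ' '.join(in_keyword_list)
--     words = words.strip()
--     nospace = ' ' + words.replace(' ', '') + ' '
--     withspace = ' ' + words + ' '
--
--     def padded(p):
--         return ' ' + p.replace(',', ' ') + ' '
--
--     matched = [p for p in in_list_products
--                if nospace in padded(p) or withspace in padded(p)]
--
--     def and_match(s):
--         return all(k != 'none' and k in s for k in in_q_word_list)
--
--     def or_key(k, s):
--         if k == 'none':
--             return True
--         parts = k.split(' ')
--         if all(part in s for part in parts):
--             return True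
--         return len(parts) == 2 and k.replace(' ', '') in s
--
--     def or_match(s):
--         return any(or_key(k, s) for k in in_q_word_list)
--
--     # one deduplicating bucketed pass over matched
--     seen = set()
--     and_bucket, or_bucket, rest_bucket = [], [], []
--     for s in matched:
--         if s in seen:
--             continue
--         seen.add(s)
--         if and_match(s):
--             and_bucket.append(s)
--         elif or_match(s):
--             or_bucket.append(s)
--         else:
--             rest_bucket.append(s)
--     return and_bucket + or_bucket + rest_bucket
-- ===== Notes on version B (the rewrite author's own statement) =====
-- stated objective: alternative
-- what changed: A runs compareAnd and compareOR to build two intermediate lists and then dedups with three scan-and-append loops using linear 'not in final_list' membership tests; B makes a single bucketed pass over the whole-match list with a seen-set and per-sentence AND/OR match predicates, concatenating the three buckets.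
import Mathlib
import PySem

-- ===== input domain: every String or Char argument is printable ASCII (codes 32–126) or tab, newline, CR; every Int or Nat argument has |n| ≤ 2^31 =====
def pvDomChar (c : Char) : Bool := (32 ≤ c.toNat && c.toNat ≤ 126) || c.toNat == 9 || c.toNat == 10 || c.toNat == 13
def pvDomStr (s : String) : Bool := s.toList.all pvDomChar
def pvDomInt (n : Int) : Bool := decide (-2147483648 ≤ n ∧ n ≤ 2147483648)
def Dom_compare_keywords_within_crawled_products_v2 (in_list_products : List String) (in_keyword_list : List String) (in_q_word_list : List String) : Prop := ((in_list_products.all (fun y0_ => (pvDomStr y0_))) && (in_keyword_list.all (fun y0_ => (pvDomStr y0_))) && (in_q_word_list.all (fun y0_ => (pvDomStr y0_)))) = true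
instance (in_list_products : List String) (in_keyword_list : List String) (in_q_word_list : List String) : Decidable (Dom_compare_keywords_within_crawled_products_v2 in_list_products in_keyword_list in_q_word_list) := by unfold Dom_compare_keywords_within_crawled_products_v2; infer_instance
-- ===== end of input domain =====

-- B replaces A's three repeated scan-and-append dedup loops by one bucketed pass
-- over the whole-match list with a seen-set and per-sentence match predicates.

-- ===== PORT A =====
-- helper compareWhole of A
def pvCompareWholeA (in_main_words_list : List String) (in_list_products : List String) : List String :=
  let words0 : List Char :=
    if in_main_words_list.length < 2 then ((PySem.List.pyGet? in_main_words_list 0).getD "").toList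
    else PySem.Chars.join [' '] (in_main_words_list.map String.toList)
  let words := PySem.Chars.strip words0
  let words_nospace := ' ' :: (PySem.Chars.replace words [' '] [] ++ [' '])
  let words_withspace := ' ' :: (PySem.Chars.strip words ++ [' '])
  in_list_products.foldl (fun match_list product =>
    let product_only_text := ' ' :: (PySem.Chars.replace product.toList [','] [' '] ++ [' '])
    if PySem.Chars.isIn words_nospace product_only_text then match_list ++ [product]
    else if PySem.Chars.isIn words_withspace product_only_text then match_list ++ [product]
    else match_list) []

-- helper compareAnd of A
def pvCompareAndA (input_keyword_list : List String) (compare_to : List String) : List String :=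
  compare_to.foldl (fun output_list dst_sentence =>
    let real_cnt := input_keyword_list.foldl (fun c keyword =>
      if PySem.Chars.isIn keyword.toList dst_sentence.toList && !(keyword == "none") then c + 1 else c) (0 : Int)
    if real_cnt = (input_keyword_list.length : Int) then output_list ++ [dst_sentence] else output_list) []

-- inner keyword loop of A's compareOR: true iff the loop appends dst_sentence (and breaks)
def pvOrLoopA (dst_sentence : String) : List String → Bool
  | [] => false
  | keyword :: rest =>
    if keyword == "none" then true
    else
      let splitKeyword := PySem.Chars.splitOn keyword.toList [' ']
      let sameCount := splitKeyword.foldl (fun c sKey =>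
        if PySem.Chars.isIn sKey dst_sentence.toList then c + 1 else c) (0 : Int)
      let detectGood := decide (sameCount = (splitKeyword.length : Int))
      if detectGood then true
      else if splitKeyword.length == 2 && PySem.Chars.isIn (PySem.Chars.replace keyword.toList [' '] []) dst_sentence.toList then true
      else pvOrLoopA dst_sentence rest

-- helper compareOR of A
def pvCompareORA (input_keyword_list : List String) (compare_to : List String) : List String :=
  compare_to.foldl (fun output_list dst_sentence =>
    if pvOrLoopA dst_sentence input_keyword_list then output_list ++ [dst_sentence] else output_list) []

def compare_keywords_within_crawled_products_v2 (in_list_products : List String) (in_keyword_list : List String) (in_q_word_list : List String) : List String :=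
  let comp_whole := pvCompareWholeA in_keyword_list in_list_products
  if comp_whole.length > 0 then
    let q_word_and := pvCompareAndA in_q_word_list comp_whole
    let q_word_or := pvCompareORA in_q_word_list comp_whole
    let fl1 := q_word_and.foldl (fun fl r => if fl.contains r then fl else fl ++ [r]) ([] : List String)
    let fl2 := q_word_or.foldl (fun fl r => if fl.contains r then fl else fl ++ [r]) fl1
    comp_whole.foldl (fun fl r => if fl.contains r then fl else fl ++ [r]) fl2
  else []

-- ===== PORT B =====
def pvAndMatch (in_q_word_list : List String) (s : String) : Bool :=
  in_q_word_list.all (fun k => !(k == "none") && PySem.Chars.isIn k.toList s.toList)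

def pvOrKey (k s : String) : Bool :=
  if k == "none" then true
  else
    let parts := PySem.Chars.splitOn k.toList [' ']
    if parts.all (fun part => PySem.Chars.isIn part s.toList) then true
    else parts.length == 2 && PySem.Chars.isIn (PySem.Chars.replace k.toList [' '] []) s.toList

def pvOrMatch (in_q_word_list : List String) (s : String) : Bool :=
  in_q_word_list.any (fun k => pvOrKey k s)

-- B's whole-phrase filter (list comprehension)
def pvMatchedB (in_keyword_list : List String) (in_list_products : List String) : List String :=
  let words0 : List Char :=
    if in_keyword_list.length < 2 then ((PySem.List.pyGet? in_keyword_list 0).getD "").toList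
    else PySem.Chars.join [' '] (in_keyword_list.map String.toList)
  let words := PySem.Chars.strip words0
  let nospace := ' ' :: (PySem.Chars.replace words [' '] [] ++ [' '])
  let withspace := ' ' :: (words ++ [' '])
  in_list_products.filter (fun p =>
    let pt := ' ' :: (PySem.Chars.replace p.toList [','] [' '] ++ [' '])
    PySem.Chars.isIn nospace pt || PySem.Chars.isIn withspace pt)

def compare_keywords_within_crawled_products_v2_alt (in_list_products : List String) (in_keyword_list : List String) (in_q_word_list : List String) : List String :=
  let matched := pvMatchedB in_keyword_list in_list_products
  let st := matched.foldl
    (fun (st : PySem.Set String × List String × List String × List String) s =>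
      if PySem.Set.contains st.1 s then st
      else
        let seen := PySem.Set.add st.1 s
        if pvAndMatch in_q_word_list s then (seen, st.2.1 ++ [s], st.2.2.1, st.2.2.2)
        else if pvOrMatch in_q_word_list s then (seen, st.2.1, st.2.2.1 ++ [s], st.2.2.2)
        else (seen, st.2.1, st.2.2.1, st.2.2.2 ++ [s]))
    (PySem.Set.empty, ([] : List String), ([] : List String), ([] : List String))
  st.2.1 ++ st.2.2.1 ++ st.2.2.2

-- ===== PRECONDITION & SPEC =====
-- Pre_ excludes only the empty keyword list, on which A raises IndexError at in_main_words_list[0].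
def Pre_compare_keywords_within_crawled_products_v2 (in_list_products : List String) (in_keyword_list : List String) (in_q_word_list : List String) : Prop :=
  in_keyword_list ≠ []
instance (in_list_products : List String) (in_keyword_list : List String) (in_q_word_list : List String) : Decidable (Pre_compare_keywords_within_crawled_products_v2 in_list_products in_keyword_list in_q_word_list) := by unfold Pre_compare_keywords_within_crawled_products_v2; infer_instance

def pvWitness_compare_keywords_within_crawled_products_v2 : List String × List String × List String :=
  (["milk tea, green", "coffee"], ["milk tea"], ["green"])

def Spec_compare_keywords_within_crawled_products_v2 (in_list_products : List String) (in_keyword_list : List String) (in_q_word_list : List String) (out : List String) : Prop := out = compare_keywords_within_crawled_products_v2_alt in_list_products in_keyword_list in_q_word_list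
instance (in_list_products : List String) (in_keyword_list : List String) (in_q_word_list : List String) (out : List String) : Decidable (Spec_compare_keywords_within_crawled_products_v2 in_list_products in_keyword_list in_q_word_list out) := by unfold Spec_compare_keywords_within_crawled_products_v2; infer_instance

-- ===== CLAIM (what is proved, stated in full; the proofs are below) =====
def Claim_equal_compare_keywords_within_crawled_products_v2 : Prop := ∀ (in_list_products : List String) (in_keyword_list : List String) (in_q_word_list : List String), Dom_compare_keywords_within_crawled_products_v2 in_list_products in_keyword_list in_q_word_list → Pre_compare_keywords_within_crawled_products_v2 in_list_products in_keyword_list in_q_word_list → Spec_compare_keywords_within_crawled_products_v2 in_list_products in_keyword_list in_q_word_list (compare_keywords_within_crawled_products_v2 in_list_products in_keyword_list in_q_word_list)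

-- ===== LEMMAS AND PROOFS =====

-- first-occurrence dedup against a seen list (proof-only device)
def pvDD (seen : List String) : List String → List String
  | [] => []
  | x :: xs => if seen.contains x then pvDD seen xs else x :: pvDD (seen ++ [x]) xs

lemma pvFoldlDedup (l : List String) : ∀ acc,
    l.foldl (fun fl r => if fl.contains r then fl else fl ++ [r]) acc = acc ++ pvDD acc l := by
  induction l with
  | nil => intro acc; simp [pvDD]
  | cons x xs ih =>
    intro acc
    rw [List.foldl_cons, ih]
    by_cases h : x ∈ acc
    · simp [pvDD, h]
    · simp [pvDD, h]

lemma pvDD_filter (p : String → Bool) : ∀ (l : List String) (s), pvDD s (l.filter p) = (pvDD s l).filter p := by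
  intro l
  induction l with
  | nil => intro s; rfl
  | cons x xs ih =>
    intro s
    by_cases hp : p x
    · by_cases hc : x ∈ s
      · simp [pvDD, hp, hc, ih]
      · simp [pvDD, hp, hc, ih]
    · by_cases hc : x ∈ s
      · simp [pvDD, hp, hc, ih]
      · simp only [List.filter_cons, hp, Bool.false_eq_true, if_false, pvDD,
          List.contains_eq_mem, hc, decide_false]
        rw [← ih]
        have key : ∀ (ys : List String) (s t : List String),
            (∀ a ∈ ys, (a ∈ s) ↔ (a ∈ t)) → pvDD s ys = pvDD t ys := by
          intro ys
          induction ys with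
          | nil => intro s t _; rfl
          | cons y zs ih2 =>
            intro s t h
            have hy : (y ∈ s) ↔ (y ∈ t) := h y (by simp)
            by_cases ht2 : y ∈ t
            · simp [pvDD, ht2, hy.mpr ht2, ih2 _ _ (fun a ha => h a (by simp [ha]))]
            · have hs2 : y ∉ s := fun hh => ht2 (hy.mp hh)
              simp only [pvDD, List.contains_eq_mem, hs2, ht2, decide_false, Bool.false_eq_true,
                if_false]
              congr 1
              exact ih2 _ _ (fun a ha => by
                have h2 := h a (by simp [ha])
                simp [h2])
        refine key _ _ _ (fun a ha => ?_)
        have hax : a ≠ x := by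
          rintro rfl
          have := List.of_mem_filter ha
          simp [hp] at this
        simp [hax]

lemma pvDD_seen : ∀ (l : List String) (s), pvDD s l = (pvDD [] l).filter (fun x => !s.contains x) := by
  intro l
  induction l with
  | nil => intro s; rfl
  | cons x xs ih =>
    intro s
    have base : pvDD [] (x :: xs) = x :: (pvDD [] xs).filter (fun a => !(List.contains [x] a)) := by
      have e : ([] : List String).contains x = false := rfl
      simp only [pvDD, e, Bool.false_eq_true, if_false]
      rw [List.nil_append, ih [x]]
    rw [base]
    by_cases hc : x ∈ s
    · have hcc : s.contains x = true := by
        simp only [List.contains_eq_mem, decide_eq_true_eq]; exact hc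
      have hnc : (!s.contains x) = false := by rw [hcc]; rfl
      simp only [pvDD, hcc, if_true, ih s, List.filter_cons, hnc, Bool.false_eq_true, if_false]
      rw [List.filter_filter]
      refine List.filter_congr (fun a _ => ?_)
      by_cases hax : a = x
      · subst hax; rw [hnc]; simp
      · have h1 : List.contains [x] a = false := by
          simp only [List.contains_eq_mem, decide_eq_false_iff_not, List.mem_singleton]; exact hax
        rw [h1]; simp
    · have hcc : s.contains x = false := by
        simp only [List.contains_eq_mem, decide_eq_false_iff_not]; exact hc
      have htt : (!s.contains x) = true := by rw [hcc]; rfl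
      simp only [pvDD, hcc, Bool.false_eq_true, if_false, List.filter_cons, htt, if_true]
      congr 1
      rw [ih (s ++ [x]), List.filter_filter]
      refine List.filter_congr (fun a _ => ?_)
      rw [List.contains_append]
      cases s.contains a <;> cases List.contains [x] a <;> rfl

lemma pvCompareAndA_eq (ql l : List String) : pvCompareAndA ql l = l.filter (pvAndMatch ql) := by
  unfold pvCompareAndA
  rw [PySem.List.foldl_append_ite_eq_filter, List.nil_append]
  refine List.filter_congr (fun s _ => ?_)
  rw [PySem.List.foldl_count_if, zero_add]
  refine Bool.eq_iff_iff.mpr ?_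
  simp only [decide_eq_true_eq, Nat.cast_inj, pvAndMatch, List.all_eq_true, ← List.countP_eq_length]
  constructor
  · intro h
    rw [← h]
    exact List.countP_congr (fun a _ => by rw [Bool.and_comm])
  · intro h
    rw [← h]
    exact List.countP_congr (fun a _ => by rw [Bool.and_comm])

lemma pvOrLoopA_eq (s : String) : ∀ (ql : List String), pvOrLoopA s ql = pvOrMatch ql s := by
  intro ql
  induction ql with
  | nil => rfl
  | cons k rest ih =>
    simp only [pvOrLoopA, pvOrMatch, List.any_cons]
    by_cases hk : k == "none"
    · simp [pvOrKey, hk]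
    · have hall : decide ((PySem.Chars.splitOn k.toList [' ']).foldl
          (fun c sKey => if PySem.Chars.isIn sKey s.toList then c + 1 else c) (0 : Int)
          = ((PySem.Chars.splitOn k.toList [' ']).length : Int))
          = (PySem.Chars.splitOn k.toList [' ']).all (fun part => PySem.Chars.isIn part s.toList) := by
        rw [PySem.List.foldl_count_if, zero_add]
        refine Bool.eq_iff_iff.mpr ?_
        simp [List.all_eq_true, ← List.countP_eq_length]
      simp only [hk, Bool.false_eq_true, if_false, hall, pvOrKey]
      by_cases hg : (PySem.Chars.splitOn k.toList [' ']).all (fun part => PySem.Chars.isIn part s.toList)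
      · simp [hg]
      · by_cases h2 : (PySem.Chars.splitOn k.toList [' ']).length == 2
          && PySem.Chars.isIn (PySem.Chars.replace k.toList [' '] []) s.toList
        · simp [hg, h2]
        · simp [hg, h2, ih, pvOrMatch, pvOrKey]

lemma pvCompareORA_eq (ql l : List String) : pvCompareORA ql l = l.filter (pvOrMatch ql) := by
  unfold pvCompareORA
  rw [PySem.List.foldl_append_if_eq_filter, List.nil_append]
  exact List.filter_congr (fun s _ => pvOrLoopA_eq s ql)

lemma pvDropWhileSnoc {α : Type} (p : α → Bool) (x : α) (hx : p x = false) :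
    ∀ (l : List α), ∃ l', (l ++ [x]).dropWhile p = l' ++ [x] := by
  intro l
  induction l with
  | nil => exact ⟨[], by simp [List.dropWhile_cons, hx]⟩
  | cons a t ih =>
    by_cases ha : p a
    · simpa [List.dropWhile_cons, ha] using ih
    · exact ⟨a :: t, by simp [List.dropWhile_cons, ha]⟩

lemma pvLstripRstrip (t : List Char) (ht : t.dropWhile PySem.Chars.isspace = t) :
    PySem.Chars.lstrip (PySem.Chars.rstrip t) = PySem.Chars.rstrip t := by
  cases h : t with
  | nil => simp [PySem.Chars.rstrip, PySem.Chars.lstrip]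
  | cons x xs =>
    subst h
    have hx : PySem.Chars.isspace x = false := by
      by_contra hh
      rw [Bool.not_eq_false] at hh
      rw [List.dropWhile_cons, if_pos hh] at ht
      have h1 := congrArg List.length ht
      have h2 := List.length_dropWhile_le PySem.Chars.isspace xs
      simp at h1
      omega
    unfold PySem.Chars.rstrip PySem.Chars.lstrip
    have : (x :: xs).reverse = xs.reverse ++ [x] := by simp
    rw [this]
    obtain ⟨l', hl'⟩ := pvDropWhileSnoc PySem.Chars.isspace x hx xs.reverse
    rw [hl']
    simp [List.dropWhile_cons, hx]

lemma pvStripIdem (l : List Char) : PySem.Chars.strip (PySem.Chars.strip l) = PySem.Chars.strip l := by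
  unfold PySem.Chars.strip
  have h1 : (PySem.Chars.lstrip l).dropWhile PySem.Chars.isspace = PySem.Chars.lstrip l := by
    unfold PySem.Chars.lstrip
    exact List.dropWhile_idempotent _ _
  rw [pvLstripRstrip _ h1]
  unfold PySem.Chars.rstrip
  simp [List.dropWhile_idempotent]

lemma pvIfIf (c1 c2 : String → Bool) (l : List String) :
    l.foldl (fun acc x => if c1 x then acc ++ [x] else if c2 x then acc ++ [x] else acc) [] =
      l.filter (fun x => c1 x || c2 x) := by
  rw [PySem.List.foldl_congr_mem _
    (fun acc x => if c1 x then acc ++ [x] else if c2 x then acc ++ [x] else acc)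
    (fun acc x => if (c1 x || c2 x) then acc ++ [x] else acc) []
    (fun acc x _ => by cases h1 : c1 x <;> cases h2 : c2 x <;> simp [h1, h2])]
  rw [PySem.List.foldl_append_if_eq_filter, List.nil_append]

lemma pvWholeA_eq (kl lp : List String) : pvCompareWholeA kl lp = pvMatchedB kl lp := by
  unfold pvCompareWholeA pvMatchedB
  dsimp only
  rw [pvStripIdem]
  exact pvIfIf _ _ lp

lemma pvBucket (ql : List String) :
    ∀ (l : List String) (seen ab ob rb : List String),
    l.foldl (fun (st : PySem.Set String × List String × List String × List String) s =>
      if PySem.Set.contains st.1 s then st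
      else
        let seen := PySem.Set.add st.1 s
        if pvAndMatch ql s then (seen, st.2.1 ++ [s], st.2.2.1, st.2.2.2)
        else if pvOrMatch ql s then (seen, st.2.1, st.2.2.1 ++ [s], st.2.2.2)
        else (seen, st.2.1, st.2.2.1, st.2.2.2 ++ [s])) (seen, ab, ob, rb) =
      (seen ++ pvDD seen l,
       ab ++ (pvDD seen l).filter (pvAndMatch ql),
       ob ++ (pvDD seen l).filter (fun x => !pvAndMatch ql x && pvOrMatch ql x),
       rb ++ (pvDD seen l).filter (fun x => !pvAndMatch ql x && !pvOrMatch ql x)) := by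
  intro l
  induction l with
  | nil => intro seen ab ob rb; simp [pvDD]
  | cons x xs ih =>
    intro seen ab ob rb
    rw [List.foldl_cons]
    by_cases hc : x ∈ seen
    · have hstep : (if PySem.Set.contains seen x then (seen, ab, ob, rb)
          else
            let seen' := PySem.Set.add seen x
            if pvAndMatch ql x then (seen', ab ++ [x], ob, rb)
            else if pvOrMatch ql x then (seen', ab, ob ++ [x], rb)
            else (seen', ab, ob, rb ++ [x])) = (seen, ab, ob, rb) := by
        simp [PySem.Set.contains, List.contains_eq_mem, hc]
      simp only [hstep, ih]
      simp [pvDD, hc]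
    · have hadd : PySem.Set.add seen x = seen ++ [x] := by
        simp [PySem.Set.add, PySem.Set.contains, List.contains_eq_mem, hc]
      have hdd : pvDD seen (x :: xs) = x :: pvDD (seen ++ [x]) xs := by
        simp [pvDD, hc]
      rw [hdd]
      by_cases ha : pvAndMatch ql x
      · have hstep : (if PySem.Set.contains seen x then (seen, ab, ob, rb)
            else
              let seen' := PySem.Set.add seen x
              if pvAndMatch ql x then (seen', ab ++ [x], ob, rb)
              else if pvOrMatch ql x then (seen', ab, ob ++ [x], rb)
              else (seen', ab, ob, rb ++ [x])) = (seen ++ [x], ab ++ [x], ob, rb) := by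
          simp [PySem.Set.contains, List.contains_eq_mem, hc, hadd, ha]
        simp only [hstep, ih]
        simp [ha, List.filter_cons]
      · by_cases ho : pvOrMatch ql x
        · have hstep : (if PySem.Set.contains seen x then (seen, ab, ob, rb)
              else
                let seen' := PySem.Set.add seen x
                if pvAndMatch ql x then (seen', ab ++ [x], ob, rb)
                else if pvOrMatch ql x then (seen', ab, ob ++ [x], rb)
                else (seen', ab, ob, rb ++ [x])) = (seen ++ [x], ab, ob ++ [x], rb) := by
            simp [PySem.Set.contains, List.contains_eq_mem, hc, hadd, ha, ho]
          simp only [hstep, ih]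
          simp [ha, ho, List.filter_cons]
        · have hstep : (if PySem.Set.contains seen x then (seen, ab, ob, rb)
              else
                let seen' := PySem.Set.add seen x
                if pvAndMatch ql x then (seen', ab ++ [x], ob, rb)
                else if pvOrMatch ql x then (seen', ab, ob ++ [x], rb)
                else (seen', ab, ob, rb ++ [x])) = (seen ++ [x], ab, ob, rb ++ [x]) := by
            simp [PySem.Set.contains, List.contains_eq_mem, hc, hadd, ha, ho]
          simp only [hstep, ih]
          simp [ha, ho, List.filter_cons]

-- contains of a filtered unique list, for elements of the list
lemma pvContainsFilter (U : List String) (p : String → Bool) {x : String} (hx : x ∈ U) :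
    (U.filter p).contains x = p x := by
  rw [List.contains_eq_mem]
  by_cases hp : p x
  · simp [List.mem_filter, hx, hp]
  · simp [List.mem_filter, hp]

-- ===== VERDICT (by name: the statement is the Claim_ definition above) =====
theorem compare_keywords_within_crawled_products_v2_spec : Claim_equal_compare_keywords_within_crawled_products_v2 := by
  intro lp kl ql _ _
  unfold Spec_compare_keywords_within_crawled_products_v2
  unfold compare_keywords_within_crawled_products_v2 compare_keywords_within_crawled_products_v2_alt
  dsimp only
  rw [pvWholeA_eq]
  set W := pvMatchedB kl lp with hWdef
  by_cases hW : W = []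
  · simp [hW]
  · rw [if_pos (by simpa [List.length_pos_iff] using hW)]
    rw [pvCompareAndA_eq, pvCompareORA_eq]
    rw [pvFoldlDedup, pvFoldlDedup, pvFoldlDedup, List.nil_append]
    rw [show (PySem.Set.empty : PySem.Set String) = ([] : List String) from rfl]
    rw [pvBucket ql W [] [] [] []]
    dsimp only
    set U := pvDD [] W with hUdef
    have E1 : pvDD [] (W.filter (pvAndMatch ql)) = U.filter (pvAndMatch ql) := by
      rw [pvDD_filter]
    have E2 : pvDD (U.filter (pvAndMatch ql)) (W.filter (pvOrMatch ql)) =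
        U.filter (fun x => !pvAndMatch ql x && pvOrMatch ql x) := by
      rw [pvDD_filter, pvDD_seen W (U.filter (pvAndMatch ql)), ← hUdef, List.filter_filter]
      refine List.filter_congr (fun x hx => ?_)
      rw [pvContainsFilter U (pvAndMatch ql) hx]
      cases pvAndMatch ql x <;> cases pvOrMatch ql x <;> rfl
    rw [E1, E2]
    have E3 : pvDD (U.filter (pvAndMatch ql) ++ U.filter (fun x => !pvAndMatch ql x && pvOrMatch ql x)) W =
        U.filter (fun x => !pvAndMatch ql x && !pvOrMatch ql x) := by
      rw [pvDD_seen W _, ← hUdef]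
      refine List.filter_congr (fun x hx => ?_)
      rw [List.contains_append, pvContainsFilter U (pvAndMatch ql) hx,
        pvContainsFilter U (fun x => !pvAndMatch ql x && pvOrMatch ql x) hx]
      cases pvAndMatch ql x <;> cases pvOrMatch ql x <;> rfl
    rw [E3]
    simp [List.append_assoc]
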